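-- pv_equiv track=rewrite | github.com/Gerrit8008/CGT_Scanner | scanner.py | analyze_port_risks
-- ===== SOURCE A (Python) =====
-- def analyze_port_risks(open_ports):
--     """Analyze the risk level of open ports"""
--     risks = []
--
--     high_risk_ports = {
--         3389: "Remote Desktop Protocol (RDP) - High security risk if exposed",
--         21: "FTP - Transmits credentials in plain text",
--         23: "Telnet - Insecure, transmits data in plain text",
--         5900: "VNC - Remote desktop access, often lacks encryption",
--         1433: "Microsoft SQL Server - Database access",
--         3306: "MySQL Database - Potential attack vector if unprotected",
--         445: "SMB - Windows file sharing, historically vulnerable",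
--         139: "NetBIOS - Windows networking, potential attack vector"
--     }
--
--     medium_risk_ports = {
--         80: "HTTP - Web server without encryption",
--         25: "SMTP - Email transmission",
--         110: "POP3 - Email retrieval (older protocol)",
--         143: "IMAP - Email retrieval (often unencrypted)",
--         8080: "Alternative HTTP port, often used for proxies or development"
--     }
--
--     for port in open_ports:
--         if port in high_risk_ports:
--             risks.append((port, high_risk_ports[port], "High"))
--         elif port in medium_risk_ports:
--             risks.append((port, medium_risk_ports[port], "Medium"))
--         else:
--             risks.append((port, f"Unknown service on port {port}", "Low"))
--
--     # Sort by severity (High first)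
--     return sorted(risks, key=lambda x: 0 if x[2] == "High" else (1 if x[2] == "Medium" else 2))
-- ===== SOURCE B (Python) =====
-- def analyze_port_risks(open_ports):
--     """Analyze the risk level of open ports"""
--     # one merged lookup table: port -> (message, severity)
--     risk_table = {
--         3389: ("Remote Desktop Protocol (RDP) - High security risk if exposed", "High"),
--         21: ("FTP - Transmits credentials in plain text", "High"),
--         23: ("Telnet - Insecure, transmits data in plain text", "High"),
--         5900: ("VNC - Remote desktop access, often lacks encryption", "High"),
--         1433: ("Microsoft SQL Server - Database access", "High"),
--         3306: ("MySQL Database - Potential attack vector if unprotected", "High"),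
--         445: ("SMB - Windows file sharing, historically vulnerable", "High"),
--         139: ("NetBIOS - Windows networking, potential attack vector", "High"),
--         80: ("HTTP - Web server without encryption", "Medium"),
--         25: ("SMTP - Email transmission", "Medium"),
--         110: ("POP3 - Email retrieval (older protocol)", "Medium"),
--         143: ("IMAP - Email retrieval (often unencrypted)", "Medium"),
--         8080: ("Alternative HTTP port, often used for proxies or development", "Medium"),
--     }
--
--     def classify(port):
--         msg, sev = risk_table.get(port, (f"Unknown service on port {port}", "Low"))
--         return (port, msg, sev)
--
--     labeled = [classify(p) for p in open_ports]
--     # staged severity passes reproduce the stable sort's grouped, order-preserving output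
--     return [x for sev in ("High", "Medium", "Low") for x in labeled if x[2] == sev]
-- ===== Notes on version B (the rewrite author's own statement) =====
-- stated objective: alternative
-- what changed: Replaces the two risk dicts and the comparison sort with a single merged port->(message,severity) table, one classification map over the input, and three staged severity filter passes (High, Medium, Low) whose concatenation reproduces the stable sort's grouped order.
import Mathlib
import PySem

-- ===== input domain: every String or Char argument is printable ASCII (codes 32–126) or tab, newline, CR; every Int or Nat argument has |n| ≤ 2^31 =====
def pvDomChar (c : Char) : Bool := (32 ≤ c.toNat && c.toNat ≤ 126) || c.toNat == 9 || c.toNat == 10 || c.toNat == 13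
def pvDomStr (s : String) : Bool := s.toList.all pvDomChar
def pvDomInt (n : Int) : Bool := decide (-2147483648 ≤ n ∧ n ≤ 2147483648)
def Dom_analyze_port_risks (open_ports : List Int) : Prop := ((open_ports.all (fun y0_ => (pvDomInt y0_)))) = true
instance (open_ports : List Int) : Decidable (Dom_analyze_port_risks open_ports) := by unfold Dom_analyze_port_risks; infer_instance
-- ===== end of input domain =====

-- B replaces A's two dicts and sort by one merged port->(message,severity) table, a classification map, and three staged severity filter passes (objective: alternative decomposition; same result by sort stability).

-- ===== PORT A =====
def highRiskPortsA : PySem.Dict Int String :=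
  PySem.Dict.ofList [(3389, "Remote Desktop Protocol (RDP) - High security risk if exposed"),
   (21, "FTP - Transmits credentials in plain text"),
   (23, "Telnet - Insecure, transmits data in plain text"),
   (5900, "VNC - Remote desktop access, often lacks encryption"),
   (1433, "Microsoft SQL Server - Database access"),
   (3306, "MySQL Database - Potential attack vector if unprotected"),
   (445, "SMB - Windows file sharing, historically vulnerable"),
   (139, "NetBIOS - Windows networking, potential attack vector")]

def mediumRiskPortsA : PySem.Dict Int String :=
  PySem.Dict.ofList [(80, "HTTP - Web server without encryption"),
   (25, "SMTP - Email transmission"),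
   (110, "POP3 - Email retrieval (older protocol)"),
   (143, "IMAP - Email retrieval (often unencrypted)"),
   (8080, "Alternative HTTP port, often used for proxies or development")]

def analyze_port_risks (open_ports : List Int) : List (Int × String × String) :=
  let risks := open_ports.foldl (fun risks port =>
    match PySem.Dict.get? highRiskPortsA port with
    | some msg => risks ++ [(port, msg, "High")]
    | none =>
      match PySem.Dict.get? mediumRiskPortsA port with
      | some msg => risks ++ [(port, msg, "Medium")]
      | none => risks ++ [(port, "Unknown service on port " ++ PySem.Int.toStr port, "Low")]) []
  PySem.List.sorted risks
    (fun x => if x.2.2 = "High" then (0 : Int) else if x.2.2 = "Medium" then 1 else 2)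

-- ===== PORT B =====
def riskTableB : PySem.Dict Int (String × String) :=
  PySem.Dict.ofList
   [(3389, ("Remote Desktop Protocol (RDP) - High security risk if exposed", "High")),
    (21, ("FTP - Transmits credentials in plain text", "High")),
    (23, ("Telnet - Insecure, transmits data in plain text", "High")),
    (5900, ("VNC - Remote desktop access, often lacks encryption", "High")),
    (1433, ("Microsoft SQL Server - Database access", "High")),
    (3306, ("MySQL Database - Potential attack vector if unprotected", "High")),
    (445, ("SMB - Windows file sharing, historically vulnerable", "High")),
    (139, ("NetBIOS - Windows networking, potential attack vector", "High")),
    (80, ("HTTP - Web server without encryption", "Medium")),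
    (25, ("SMTP - Email transmission", "Medium")),
    (110, ("POP3 - Email retrieval (older protocol)", "Medium")),
    (143, ("IMAP - Email retrieval (often unencrypted)", "Medium")),
    (8080, ("Alternative HTTP port, often used for proxies or development", "Medium"))]

def classifyB (port : Int) : Int × String × String :=
  let p := PySem.Dict.getD riskTableB port ("Unknown service on port " ++ PySem.Int.toStr port, "Low")
  (port, p.1, p.2)

def analyze_port_risks_alt (open_ports : List Int) : List (Int × String × String) :=
  let labeled := open_ports.map classifyB
  ["High", "Medium", "Low"].flatMap (fun sev => labeled.filter (fun x => x.2.2 == sev))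

-- ===== PRECONDITION & SPEC =====
def Spec_analyze_port_risks (open_ports : List Int) (out : List (Int × String × String)) : Prop := out = analyze_port_risks_alt open_ports
instance (open_ports : List Int) (out : List (Int × String × String)) : Decidable (Spec_analyze_port_risks open_ports out) := by unfold Spec_analyze_port_risks; infer_instance

-- ===== CLAIM (what is proved, stated in full; the proofs are below) =====
def Claim_equal_analyze_port_risks : Prop := ∀ (open_ports : List Int), Dom_analyze_port_risks open_ports → Spec_analyze_port_risks open_ports (analyze_port_risks open_ports)

-- ===== LEMMAS AND PROOFS =====

-- the severity key of A's sort
def pkey (x : Int × String × String) : Int :=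
  if x.2.2 = "High" then 0 else if x.2.2 = "Medium" then 1 else 2

lemma pkey_cases (x : Int × String × String) : pkey x = 0 ∨ pkey x = 1 ∨ pkey x = 2 := by
  unfold pkey; split_ifs <;> simp

-- the single element A's loop produces for a port
def stepG (port : Int) : Int × String × String :=
  match PySem.Dict.get? highRiskPortsA port with
  | some msg => (port, msg, "High")
  | none =>
    match PySem.Dict.get? mediumRiskPortsA port with
    | some msg => (port, msg, "Medium")
    | none => (port, "Unknown service on port " ++ PySem.Int.toStr port, "Low")

lemma risksA_eq_map (ps : List Int) :
    ps.foldl (fun risks port =>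
      match PySem.Dict.get? highRiskPortsA port with
      | some msg => risks ++ [(port, msg, "High")]
      | none =>
        match PySem.Dict.get? mediumRiskPortsA port with
        | some msg => risks ++ [(port, msg, "Medium")]
        | none => risks ++ [(port, "Unknown service on port " ++ PySem.Int.toStr port, "Low")]) []
    = ps.map stepG := by
  have gen : ∀ (qs : List Int) (init : List (Int × String × String)),
      qs.foldl (fun risks port =>
        match PySem.Dict.get? highRiskPortsA port with
        | some msg => risks ++ [(port, msg, "High")]
        | none =>
          match PySem.Dict.get? mediumRiskPortsA port with
          | some msg => risks ++ [(port, msg, "Medium")]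
          | none => risks ++ [(port, "Unknown service on port " ++ PySem.Int.toStr port, "Low")]) init
      = init ++ qs.map stepG := by
    intro qs
    induction qs with
    | nil => intro init; simp
    | cons p t ih =>
      intro init
      rw [List.foldl_cons, List.map_cons]
      rcases hh : PySem.Dict.get? highRiskPortsA p with _ | msg
      · rcases hm : PySem.Dict.get? mediumRiskPortsA p with _ | msg
        · simp only [ih]
          simp [stepG, hh, hm]
        · simp only [ih]
          simp [stepG, hh, hm]
      · simp only [ih]
        simp [stepG, hh]
  simpa using gen ps []

lemma insertBy_append_not {α : Type} (before : α → α → Bool) (x : α) (ys zs : List α)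
    (h : ∀ y ∈ ys, before x y = false) :
    PySem.List.insertBy before x (ys ++ zs) = ys ++ PySem.List.insertBy before x zs := by
  induction ys with
  | nil => simp
  | cons y t ih =>
    have hy : before x y = false := h y (by simp)
    simp [PySem.List.insertBy, hy, ih (fun y hy' => h y (by simp [hy']))]

lemma insertBy_cons_before {α : Type} (before : α → α → Bool) (x c : α) (t : List α)
    (h : before x c = true) :
    PySem.List.insertBy before x (c :: t) = x :: c :: t := by
  simp [PySem.List.insertBy, h]

-- stable sort with a key ranging over {0,1,2} is three buckets concatenated
lemma sorted_bucket (xs : List (Int × String × String)) :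
    PySem.List.sorted xs pkey
    = xs.filter (fun x => decide (pkey x = 0)) ++ xs.filter (fun x => decide (pkey x = 1))
      ++ xs.filter (fun x => decide (pkey x = 2)) := by
  rw [PySem.List.sorted_eq_foldl_insertBy]
  induction xs using List.reverseRecOn with
  | nil => simp
  | append_singleton t x ih =>
    rw [List.foldl_append, List.foldl_cons, List.foldl_nil, ih]
    set before := fun a b => decide (pkey a < pkey b) with hb
    have hf0 : ∀ y ∈ t.filter (fun x => decide (pkey x = 0)), pkey y = 0 := by
      intro y hy; simpa using (List.mem_filter.mp hy).2
    have hf1 : ∀ y ∈ t.filter (fun x => decide (pkey x = 1)), pkey y = 1 := by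
      intro y hy; simpa using (List.mem_filter.mp hy).2
    have hf2 : ∀ y ∈ t.filter (fun x => decide (pkey x = 2)), pkey y = 2 := by
      intro y hy; simpa using (List.mem_filter.mp hy).2
    rcases pkey_cases x with h0 | h1 | h2
    · -- x goes at the end of bucket 0
      rw [List.append_assoc, insertBy_append_not before x _ _
        (by intro y hy; simp [hb, hf0 y hy, h0])]
      have : PySem.List.insertBy before x
          (t.filter (fun x => decide (pkey x = 1)) ++ t.filter (fun x => decide (pkey x = 2)))
          = x :: (t.filter (fun x => decide (pkey x = 1)) ++ t.filter (fun x => decide (pkey x = 2))) := by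
        rcases hc : t.filter (fun x => decide (pkey x = 1)) ++ t.filter (fun x => decide (pkey x = 2)) with _ | ⟨c, t'⟩
        · simp [PySem.List.insertBy]
        · have hcm : c ∈ t.filter (fun x => decide (pkey x = 1)) ++ t.filter (fun x => decide (pkey x = 2)) := by
            rw [hc]; simp
          have hck : pkey c = 1 ∨ pkey c = 2 := by
            rcases List.mem_append.mp hcm with h | h
            · exact Or.inl (hf1 c h)
            · exact Or.inr (hf2 c h)
          apply insertBy_cons_before
          rcases hck with h | h <;> simp [hb, h, h0]
      rw [this]
      simp [List.filter_append, h0]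
    · -- x goes at the end of bucket 1
      rw [List.append_assoc, insertBy_append_not before x _ _
        (by intro y hy; simp [hb, hf0 y hy, h1]),
        insertBy_append_not before x _ _
        (by intro y hy; simp [hb, hf1 y hy, h1])]
      have : PySem.List.insertBy before x (t.filter (fun x => decide (pkey x = 2)))
          = x :: t.filter (fun x => decide (pkey x = 2)) := by
        rcases hc : t.filter (fun x => decide (pkey x = 2)) with _ | ⟨c, t'⟩
        · simp [PySem.List.insertBy]
        · have hck : pkey c = 2 := hf2 c (by rw [hc]; simp)
          apply insertBy_cons_before
          simp [hb, hck, h1]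
      rw [this]
      simp [List.filter_append, h1]
    · -- x goes at the very end
      rw [PySem.List.insertBy_of_forall_not_before]
      · simp [List.filter_append, h2]
      · intro y hy
        rcases List.mem_append.mp hy with h | h
        · rcases List.mem_append.mp h with h | h
          · simp [hb, hf0 y h, h2]
          · simp [hb, hf1 y h, h2]
        · simp [hb, hf2 y h, h2]

-- B's merged-table classification agrees with A's two-dict branch for every port
lemma classify_eq_step (p : Int) : classifyB p = stepG p := by
  unfold classifyB stepG riskTableB highRiskPortsA mediumRiskPortsA
  by_cases h1 : p = 3389
  · subst h1; rfl
  by_cases h2 : p = 21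
  · subst h2; rfl
  by_cases h3 : p = 23
  · subst h3; rfl
  by_cases h4 : p = 5900
  · subst h4; rfl
  by_cases h5 : p = 1433
  · subst h5; rfl
  by_cases h6 : p = 3306
  · subst h6; rfl
  by_cases h7 : p = 445
  · subst h7; rfl
  by_cases h8 : p = 139
  · subst h8; rfl
  by_cases h9 : p = 80
  · subst h9; rfl
  by_cases h10 : p = 25
  · subst h10; rfl
  by_cases h11 : p = 110
  · subst h11; rfl
  by_cases h12 : p = 143
  · subst h12; rfl
  by_cases h13 : p = 8080
  · subst h13; rfl
  simp [PySem.Dict.ofList, PySem.Dict.update, PySem.Dict.get?_insert, PySem.Dict.getD,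
    h1, h2, h3, h4, h5, h6, h7, h8, h9, h10, h11, h12, h13]

-- each classified tuple's severity is one of the three labels
lemma stepG_sev (p : Int) :
    (stepG p).2.2 = "High" ∨ (stepG p).2.2 = "Medium" ∨ (stepG p).2.2 = "Low" := by
  unfold stepG
  rcases PySem.Dict.get? highRiskPortsA p with _ | m
  · rcases PySem.Dict.get? mediumRiskPortsA p with _ | m <;> simp
  · simp

lemma key_eq_pkey :
    (fun x : Int × String × String => if x.2.2 = "High" then (0 : Int) else if x.2.2 = "Medium" then 1 else 2) = pkey := rfl

lemma filter_high (xs : List (Int × String × String)) :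
    xs.filter (fun x => x.2.2 == "High") = xs.filter (fun x => decide (pkey x = 0)) := by
  apply List.filter_congr; intro x _; unfold pkey; split_ifs with h <;> simp [h]

lemma filter_medium (xs : List (Int × String × String)) :
    xs.filter (fun x => x.2.2 == "Medium") = xs.filter (fun x => decide (pkey x = 1)) := by
  apply List.filter_congr; intro x _; unfold pkey
  split_ifs with h h' <;> simp_all

lemma filter_low (ps : List Int) :
    (ps.map stepG).filter (fun x => x.2.2 == "Low")
    = (ps.map stepG).filter (fun x => decide (pkey x = 2)) := by
  apply List.filter_congr; intro x hx
  obtain ⟨p, -, rfl⟩ := List.mem_map.mp hx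
  rcases stepG_sev p with h | h | h <;> simp [pkey, h]

-- ===== VERDICT (by name: the statement is the Claim_ definition above) =====
theorem analyze_port_risks_spec : Claim_equal_analyze_port_risks := by
  intro ps _
  unfold Spec_analyze_port_risks analyze_port_risks analyze_port_risks_alt
  have hm : ps.map classifyB = ps.map stepG := List.map_congr_left (fun p _ => classify_eq_step p)
  simp only [risksA_eq_map, key_eq_pkey, hm, List.flatMap_cons, List.flatMap_nil,
    List.append_nil, filter_high, filter_medium, filter_low]
  rw [sorted_bucket, List.append_assoc]
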